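-- pv_equiv track=rewrite | github.com/uppeabhishek/problem-solving | 1663-smallest-string-with-a-given-numeric-value/1663-smallest-string-with-a-given-numeric-value.py | getSmallestString
-- ===== SOURCE A (Python) =====
-- def getSmallestString(n: int, k: int) -> str:
--     li = ['a'] * n
--     k = k - n
--     for i in range(n - 1, -1, -1):
--         if k > 25:
--             li[i] = 'z'
--             k -= 25
--         else:
--             li[i] = chr(97 + k)
--             break
--
--     return "".join(li)
-- ===== SOURCE B (Python) =====
-- def getSmallestString(n: int, k: int) -> str:
--     # Closed form: q trailing 'z's, one middle character, leading 'a's; no loop.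
--     if n <= 0:
--         return ""
--     rem = k - n
--     q = max(0, (rem - 1) // 25)
--     if q >= n:
--         return "z" * n
--     return "a" * (n - q - 1) + chr(97 + rem - 25 * q) + "z" * q
-- ===== Notes on version B (the rewrite author's own statement) =====
-- stated objective: simpler
-- what changed: Replaces the per-character countdown loop that subtracts 25 at a time with a closed-form computation of the number of trailing 'z's (q = max(0,(k-n-1)//25)) and the single middle character, building the string from three replications with no loop.
import Mathlib
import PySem

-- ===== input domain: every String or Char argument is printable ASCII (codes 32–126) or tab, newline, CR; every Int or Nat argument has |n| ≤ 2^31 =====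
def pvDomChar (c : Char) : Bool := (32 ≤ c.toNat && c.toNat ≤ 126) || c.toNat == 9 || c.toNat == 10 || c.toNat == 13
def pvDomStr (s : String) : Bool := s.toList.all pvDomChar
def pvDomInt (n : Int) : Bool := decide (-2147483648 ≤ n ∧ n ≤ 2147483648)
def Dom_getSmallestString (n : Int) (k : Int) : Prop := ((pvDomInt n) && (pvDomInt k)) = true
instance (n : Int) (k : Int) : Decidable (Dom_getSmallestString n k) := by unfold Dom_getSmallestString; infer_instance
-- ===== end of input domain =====

-- B replaces A's per-character countdown loop by a closed-form count of trailing 'z's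
-- and a single middle character (objective: simpler, no per-character loop).

-- ===== PORT A =====
-- the loop 'for i in range(n-1,-1,-1): …' with break; li[i] = c is List.set
def getSmallestStringLoop (idxs : List Int) (li : List Char) (k : Int) : List Char :=
  match idxs with
  | [] => li
  | i :: rest =>
      if k > 25 then getSmallestStringLoop rest (li.set i.toNat 'z') (k - 25)
      else li.set i.toNat (Char.ofNat (97 + k).toNat)   -- break

def getSmallestString (n : Int) (k : Int) : String :=
  let li := List.replicate n.toNat 'a'
  let k1 := k - n
  String.ofList (getSmallestStringLoop (PySem.List.pyRange (n - 1) (-1) (-1)) li k1)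

-- ===== PORT B =====
def getSmallestString_alt (n : Int) (k : Int) : String :=
  if n ≤ 0 then "" else
  let rem := k - n
  let q := max 0 (PySem.Int.floordiv (rem - 1) 25)
  if q ≥ n then String.ofList (List.replicate n.toNat 'z')
  else String.ofList (List.replicate (n - q - 1).toNat 'a'
        ++ [Char.ofNat (97 + rem - 25 * q).toNat]
        ++ List.replicate q.toNat 'z')

-- ===== PRECONDITION & SPEC =====
-- Pre_ excludes exactly the inputs where Python A raises ValueError: chr(97+k-n) with
-- a negative code point, i.e. n ≥ 1 and k - n < -97 (B's Python raises there too).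
def Pre_getSmallestString (n : Int) (k : Int) : Prop := n ≤ 0 ∨ -97 ≤ k - n
instance (n : Int) (k : Int) : Decidable (Pre_getSmallestString n k) := by
  unfold Pre_getSmallestString; infer_instance

def pvWitness_getSmallestString : Int × Int := (3, 27)

def Spec_getSmallestString (n : Int) (k : Int) (out : String) : Prop := out = getSmallestString_alt n k
instance (n : Int) (k : Int) (out : String) : Decidable (Spec_getSmallestString n k out) := by unfold Spec_getSmallestString; infer_instance

-- ===== CLAIM (what is proved, stated in full; the proofs are below) =====
def Claim_equal_getSmallestString : Prop := ∀ (n : Int) (k : Int), Dom_getSmallestString n k → Pre_getSmallestString n k → Spec_getSmallestString n k (getSmallestString n k)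

-- ===== LEMMAS AND PROOFS =====

-- Characterisation of A's loop started on m 'a's (with an arbitrary already-finished
-- suffix behind them), for any k.
theorem loop_eq (m : Nat) : ∀ (s : List Char) (k : Int),
    getSmallestStringLoop (PySem.List.pyRange ((m : Int) - 1) (-1) (-1))
      (List.replicate m 'a' ++ s) k =
    (if max 0 (PySem.Int.floordiv (k - 1) 25) ≥ (m : Int) then List.replicate m 'z'
     else List.replicate (m - 1 - (max 0 (PySem.Int.floordiv (k - 1) 25)).toNat) 'a'
        ++ [Char.ofNat (97 + k - 25 * max 0 (PySem.Int.floordiv (k - 1) 25)).toNat]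
        ++ List.replicate (max 0 (PySem.Int.floordiv (k - 1) 25)).toNat 'z') ++ s := by
  induction m with
  | zero =>
      intro s k
      rw [PySem.List.pyRange_neg_one_eq_nil (by omega)]
      simp [getSmallestStringLoop]
  | succ m ih =>
      intro s k
      have hq : PySem.Int.floordiv (k - 1) 25 = (k - 1) / 25 :=
        PySem.Int.floordiv_eq_ediv_of_pos (by omega)
      rw [PySem.List.pyRange_neg_one_cons (by omega)]
      have hcast : ((m : Int) + 1 - 1 - 1) = (m : Int) - 1 := by ring
      simp only [getSmallestStringLoop, Nat.cast_succ, hcast]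
      have hset : ∀ c : Char,
          (List.replicate (m + 1) 'a' ++ s).set ((m : Int) + 1 - 1).toNat c
            = List.replicate m 'a' ++ (c :: s) := by
        intro c
        have h1 : ((m : Int) + 1 - 1).toNat = m := by omega
        rw [h1]
        have h2 : List.replicate (m + 1) 'a' ++ s
            = List.replicate m 'a' ++ ('a' :: s) := by
          rw [List.replicate_succ']; simp
        rw [h2, List.set_append_right _ _ (by simp), List.length_replicate]
        simp
      by_cases hk : k > 25
      · rw [if_pos hk, hset, ih ('z' :: s) (k - 25)]
        have hq' : PySem.Int.floordiv (k - 25 - 1) 25 = (k - 25 - 1) / 25 :=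
          PySem.Int.floordiv_eq_ediv_of_pos (by omega)
        have hstep : max 0 (PySem.Int.floordiv (k - 1) 25)
            = max 0 (PySem.Int.floordiv (k - 25 - 1) 25) + 1 := by
          rw [hq, hq']; omega
        by_cases hge : max 0 (PySem.Int.floordiv (k - 25 - 1) 25) ≥ (m : Int)
        · rw [if_pos hge, if_pos (by omega)]
          rw [List.replicate_succ' (n := m)]
          simp
        · rw [if_neg hge, if_neg (by omega)]
          have hqn : (max 0 (PySem.Int.floordiv (k - 1) 25)).toNat
              = (max 0 (PySem.Int.floordiv (k - 25 - 1) 25)).toNat + 1 := by omega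
          have hchar : 97 + (k - 25) - 25 * max 0 (PySem.Int.floordiv (k - 25 - 1) 25)
              = 97 + k - 25 * max 0 (PySem.Int.floordiv (k - 1) 25) := by
            rw [hstep]; ring
          rw [hchar, hqn]
          have han : m + 1 - 1 - ((max 0 (PySem.Int.floordiv (k - 25 - 1) 25)).toNat + 1)
              = m - 1 - (max 0 (PySem.Int.floordiv (k - 25 - 1) 25)).toNat := by omega
          rw [han, List.replicate_succ' (n := (max 0 (PySem.Int.floordiv (k - 25 - 1) 25)).toNat)]
          simp
      · rw [if_neg hk, hset]
        have hq0 : max 0 (PySem.Int.floordiv (k - 1) 25) = 0 := by rw [hq]; omega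
        rw [if_neg (by omega), hq0]
        simp

theorem getSmallestString_spec : Claim_equal_getSmallestString := by
  intro n k _ _
  unfold Spec_getSmallestString getSmallestString getSmallestString_alt
  by_cases hn : n ≤ 0
  · rw [if_pos hn]
    rw [PySem.List.pyRange_neg_one_eq_nil (by omega)]
    have h0 : n.toNat = 0 := by omega
    simp only [h0, List.replicate_zero, getSmallestStringLoop]
  · rw [if_neg hn]
    have hm : ((n.toNat : Int)) = n := by omega
    have := loop_eq n.toNat [] (k - n)
    rw [hm] at this
    simp only []
    rw [List.append_nil] at this
    rw [this]
    simp only [List.append_nil]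
    by_cases hge : max 0 (PySem.Int.floordiv (k - n - 1) 25) ≥ n
    · rw [if_pos hge, if_pos hge]
    · rw [if_neg hge, if_neg hge]
      have : (n - max 0 (PySem.Int.floordiv (k - n - 1) 25) - 1).toNat
          = n.toNat - 1 - (max 0 (PySem.Int.floordiv (k - n - 1) 25)).toNat := by
        have h25 := PySem.Int.floordiv_eq_ediv_of_pos (a := k - n - 1) (b := 25) (by omega)
        omega
      rw [this]
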